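-- pv_equiv track=rewrite | github.com/posty934/agentic_EMR_System | agentic_EMR_System_v11/agents/agent3_reviewer.py | _decide_repair_path
-- ===== SOURCE A (Python) =====
-- def _decide_repair_path(issues):
--     """
--     分流原则：
--     1. 高严重度问题全部是 auto_fix -> 可以内部自动修正
--     2. 高严重度问题只要出现 ask_user -> 需要先追问患者
--     3. 如果 ask_user 和 auto_fix 混合存在：
--        - 当前不能直接自动重写最终稿
--        - 但后续在追问完成后仍应继续修稿
--     """
--     high_issues = [x for x in issues if x.get("severity") == "high"]
--
--     if not high_issues:
--         return False, False
--
--     repair_modes = {issue.get("repair_mode", "ask_user") for issue in high_issues}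
--
--     if repair_modes == {"auto_fix"}:
--         return True, False
--
--     return False, True
-- ===== SOURCE B (Python) =====
-- def _decide_repair_path(issues):
--     # Counting formulation: tally high issues and auto-fixable high issues,
--     # then derive both booleans arithmetically (no set, no branches).
--     high = sum(1 for i in issues if i.get("severity") == "high")
--     auto = sum(1 for i in issues
--                if i.get("severity") == "high"
--                and i.get("repair_mode", "ask_user") == "auto_fix")
--     return (0 < high and high == auto, auto < high)
-- ===== Notes on version B (the rewrite author's own statement) =====
-- stated objective: alternative
-- what changed: Replaces the filtered list and set-of-modes comparison with two counters (high issues, auto-fixable high issues) and derives both result booleans arithmetically from the counts, with no branches or set.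
import Mathlib
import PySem

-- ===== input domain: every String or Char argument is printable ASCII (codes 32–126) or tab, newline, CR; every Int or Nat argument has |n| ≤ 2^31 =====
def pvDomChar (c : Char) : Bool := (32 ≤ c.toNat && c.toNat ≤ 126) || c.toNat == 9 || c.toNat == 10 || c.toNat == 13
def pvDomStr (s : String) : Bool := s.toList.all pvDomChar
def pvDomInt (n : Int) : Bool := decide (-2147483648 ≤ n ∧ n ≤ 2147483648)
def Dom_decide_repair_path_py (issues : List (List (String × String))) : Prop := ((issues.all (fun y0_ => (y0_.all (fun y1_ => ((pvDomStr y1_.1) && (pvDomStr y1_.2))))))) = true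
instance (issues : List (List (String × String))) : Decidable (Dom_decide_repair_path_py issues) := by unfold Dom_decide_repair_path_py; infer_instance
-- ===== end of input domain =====

-- B replaces A's filtered list + set comparison with two counters and arithmetic comparisons (alternative decomposition).


-- ===== PORT A =====
def decide_repair_path_py (issues : List (List (String × String))) : Bool × Bool :=
  let high_issues := issues.filter (fun x => (PySem.Dict.mk x).get? "severity" == some "high")
  if high_issues.isEmpty then (false, false)
  else
    let repair_modes : PySem.Set String :=
      PySem.Set.ofList (high_issues.map (fun issue => (PySem.Dict.mk issue).getD "repair_mode" "ask_user"))
    if PySem.Set.equal repair_modes (PySem.Set.ofList ["auto_fix"]) then (true, false)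
    else (false, true)

-- ===== PORT B =====
def decide_repair_path_py_alt (issues : List (List (String × String))) : Bool × Bool :=
  let high := issues.countP (fun i => (PySem.Dict.mk i).get? "severity" == some "high")
  let auto := issues.countP (fun i =>
    ((PySem.Dict.mk i).get? "severity" == some "high")
      && ((PySem.Dict.mk i).getD "repair_mode" "ask_user" == "auto_fix"))
  (decide (0 < high) && decide (high = auto), decide (auto < high))

-- ===== PRECONDITION & SPEC =====
def Spec_decide_repair_path_py (issues : List (List (String × String))) (out : Bool × Bool) : Prop := out = decide_repair_path_py_alt issues
instance (issues : List (List (String × String))) (out : Bool × Bool) : Decidable (Spec_decide_repair_path_py issues out) := by unfold Spec_decide_repair_path_py; infer_instance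

-- ===== CLAIM (what is proved, stated in full; the proofs are below) =====
def Claim_equal_decide_repair_path_py : Prop := ∀ (issues : List (List (String × String))), Dom_decide_repair_path_py issues → Spec_decide_repair_path_py issues (decide_repair_path_py issues)

-- ===== LEMMAS AND PROOFS =====

def pvIsHigh (x : List (String × String)) : Bool := (PySem.Dict.mk x).get? "severity" == some "high"
def pvAuto (x : List (String × String)) : Bool := (PySem.Dict.mk x).getD "repair_mode" "ask_user" == "auto_fix"

-- B's two counters, written through the filter of high issues
lemma pv_counts (issues : List (List (String × String))) :
    issues.countP (fun i => pvIsHigh i && pvAuto i)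
      = (issues.filter pvIsHigh).countP pvAuto := by
  induction issues with
  | nil => rfl
  | cons h t ih =>
    by_cases hp : pvIsHigh h <;> simp [List.countP_cons, hp, ih]

-- A's set comparison, characterised for a nonempty modes list
lemma pv_set_eq_char (ms : List String) (hne : ms ≠ []) :
    PySem.Set.equal (PySem.Set.ofList ms) (PySem.Set.ofList ["auto_fix"])
      = ms.all (fun m => m == "auto_fix") := by
  rw [Bool.eq_iff_iff, PySem.Set.equal_iff]
  simp only [PySem.Set.mem_ofList, List.mem_singleton, List.all_eq_true, beq_iff_eq]
  constructor
  · intro h m hm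
    exact (h m).mp hm
  · intro hall x
    constructor
    · exact fun hx => hall x hx
    · rintro rfl
      obtain ⟨m, hm⟩ := List.exists_mem_of_ne_nil ms hne
      have := hall m hm; subst this; exact hm

-- ===== VERDICT (by name: the statement is the Claim_ definition above) =====
theorem decide_repair_path_py_spec : Claim_equal_decide_repair_path_py := by
  intro issues _
  unfold Spec_decide_repair_path_py decide_repair_path_py decide_repair_path_py_alt
  have hfe : issues.filter (fun x => (PySem.Dict.mk x).get? "severity" == some "high")
      = issues.filter pvIsHigh := rfl
  have hcnt : issues.countP (fun i => (PySem.Dict.mk i).get? "severity" == some "high")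
      = (issues.filter pvIsHigh).length := by
    simp [List.countP_eq_length_filter]; rfl
  set F := issues.filter pvIsHigh with hF
  have hauto : issues.countP (fun i =>
      ((PySem.Dict.mk i).get? "severity" == some "high")
        && ((PySem.Dict.mk i).getD "repair_mode" "ask_user" == "auto_fix"))
      = F.countP pvAuto := pv_counts issues
  have hle : F.countP pvAuto ≤ F.length := List.countP_le_length
  by_cases hnil : F = []
  · simp [hfe, hnil, hcnt, hauto]
  · have hmne : F.map (fun issue => (PySem.Dict.mk issue).getD "repair_mode" "ask_user") ≠ [] := by
      simpa using hnil
    have hall : (F.map (fun issue => (PySem.Dict.mk issue).getD "repair_mode" "ask_user")).all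
        (fun m => m == "auto_fix") = F.all pvAuto := by
      simp only [List.all_map]
      rfl
    by_cases hA : F.all pvAuto
    · have hc : F.countP pvAuto = F.length := by
        rw [List.countP_eq_length]
        intro a ha; exact (List.all_eq_true.mp hA) a ha
      simp [hfe, hnil, hcnt, hauto, pv_set_eq_char _ hmne, hall, hA, hc,
        List.length_pos_iff.mpr hnil]
    · have hc : F.countP pvAuto < F.length := by
        rcases Nat.lt_or_ge (F.countP pvAuto) F.length with h | h
        · exact h
        · exfalso
          have : F.countP pvAuto = F.length := le_antisymm hle h
          rw [List.countP_eq_length] at this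
          exact hA (List.all_eq_true.mpr this)
      simp [hfe, hnil, hcnt, hauto, pv_set_eq_char _ hmne, hall, hA,
        Nat.ne_of_gt hc]
      simpa [List.all_eq_true, Bool.not_eq_true] using hA
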